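-- pv_equiv track=rewrite | github.com/rohansumant/LeetCode | biweekly-contest-117/D.py | maxSpending
-- ===== SOURCE A (Python) =====
-- from typing import List
--
-- def maxSpending(values: List[List[int]]) -> int:
--     d = 1
--     m, n = len(values), len(values[0])
--     ans = 0
--     for i in range(m*n):
--         last = [(values[i][-1], i) for i in range(m) if len(values[i]) > 0]
--         _, ix = min(last)
--         ans += d * values[ix].pop()
--         d += 1
--     return ans
-- ===== SOURCE B (Python) =====
-- from typing import List
--
-- # Skew-heap re-implementation: keep the rows' current last elements in a
-- # self-balancing min-heap keyed by (value, row_index) instead of rescanning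
-- # all rows on every step.  O(m*n*log m) vs A's O(m*n*m).
-- # Note: A empties its argument's rows in place; B does not mutate `values`
-- # (the equivalence claimed is about the return value only).
--
-- def _merge(a, b):
--     # skew-heap merge; heaps are None or (key, left, right)
--     if a is None:
--         return b
--     if b is None:
--         return a
--     if b[0] < a[0]:
--         a, b = b, a
--     return (a[0], _merge(a[2], b), a[1])
--
--
-- def maxSpending(values: List[List[int]]) -> int:
--     m, n = len(values), len(values[0])
--     pos = [len(r) - 1 for r in values]
--     h = None
--     for i in range(m):
--         if pos[i] >= 0:
--             h = _merge(h, ((values[i][pos[i]], i), None, None))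
--     ans = 0
--     for d in range(1, m * n + 1):
--         (v, i), l, r = h
--         h = _merge(l, r)
--         ans += d * v
--         pos[i] -= 1
--         if pos[i] >= 0:
--             h = _merge(h, ((values[i][pos[i]], i), None, None))
--     return ans
-- ===== Notes on version B (the rewrite author's own statement) =====
-- stated objective: faster
-- what changed: Replaces A's per-step rebuild of the whole (last, index) list and linear min scan (plus in-place pops) by a skew min-heap of (last_value, row_index) with per-row position pointers: each of the m*n steps pops the heap minimum and pushes the row's next element, and values is no longer mutated.
import Mathlib
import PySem

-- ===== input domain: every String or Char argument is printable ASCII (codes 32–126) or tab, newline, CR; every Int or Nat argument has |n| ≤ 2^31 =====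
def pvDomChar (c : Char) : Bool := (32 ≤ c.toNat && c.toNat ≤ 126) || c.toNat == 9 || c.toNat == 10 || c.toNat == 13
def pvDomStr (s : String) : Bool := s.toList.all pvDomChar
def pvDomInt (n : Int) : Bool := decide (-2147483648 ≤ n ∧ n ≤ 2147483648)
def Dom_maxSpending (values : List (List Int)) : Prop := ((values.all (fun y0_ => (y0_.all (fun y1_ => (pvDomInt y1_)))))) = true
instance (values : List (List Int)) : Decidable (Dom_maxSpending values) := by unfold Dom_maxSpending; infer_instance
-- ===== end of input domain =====

-- B replaces A's per-step rescan of all rows (rebuild the (last, index) list, take min, pop)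
-- by a skew min-heap of (last_value, row_index) plus per-row position pointers — pop the
-- minimum, push the row's next element (objective: faster, O(mn log m) vs O(m²n)).
-- A empties its argument's rows in place; B does not mutate `values` — the equivalence
-- proved here is about the return value only.

-- ===== PORT A =====
-- Python `<` on int pairs (lexicographic), as both Pythons use it
def pvPairLt (a b : Int × Int) : Bool :=
  decide (a.1 < b.1) || (a.1 == b.1 && decide (a.2 < b.2))

-- `[(values[i][-1], i) for i in range(m) if len(values[i]) > 0]`
-- (`values[i][-1]` on a row with len > 0 is its last element: PySem.List.pyGet?_neg_one)
def pvLastA (vals : List (List Int)) (m : Nat) : List (Int × Int) :=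
  (List.range m).filterMap (fun i => (vals.getD i []).getLast?.map (fun v => (v, (i : Int))))

-- `min(last)`: Python's min on a nonempty list of int pairs = first element minimal under
-- lexicographic `<` (exact hand port: the accumulator is replaced only on strict less)
def pvMin? (l : List (Int × Int)) : Option (Int × Int) :=
  match l with
  | [] => none
  | x :: xs => some (xs.foldl (fun cur c => if pvPairLt c cur then c else cur) x)

-- one iteration of A's loop, state (values, ans, d)
def pvStepA (m : Nat) (st : List (List Int) × Int × Int) : List (List Int) × Int × Int :=
  let (vals, ans, d) := st
  match pvMin? (pvLastA vals m) with
  | none => st  -- Python raises ValueError (min of empty) here; excluded by Pre_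
  | some (_, ix) =>
    let row := vals.getD ix.toNat []
    (vals.set ix.toNat row.dropLast, ans + d * (row.getLast?.getD 0), d + 1)

def maxSpending (values : List (List Int)) : Int :=
  let m := values.length
  let n := (values.getD 0 []).length  -- values[0]: IndexError on []; excluded by Pre_
  ((List.range (m * n)).foldl (fun st _ => pvStepA m st) (values, 0, 1)).2.1

-- ===== PORT B =====
-- Source B's heaps are None or nested tuples (key, left, right); key = (value, row_index)
inductive SkewHeap : Type
  | leaf : SkewHeap
  | node : Int → Int → SkewHeap → SkewHeap → SkewHeap
deriving DecidableEq, Repr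

def SkewHeap.size : SkewHeap → Nat
  | .leaf => 0
  | .node _ _ l r => l.size + r.size + 1

-- Source B `_merge`
def pvMerge : SkewHeap → SkewHeap → SkewHeap
  | .leaf, b => b
  | a, .leaf => a
  | .node v1 i1 l1 r1, .node v2 i2 l2 r2 =>
    if pvPairLt (v2, i2) (v1, i1) then
      .node v2 i2 (pvMerge (.node v1 i1 l1 r1) r2) l2
    else
      .node v1 i1 (pvMerge r1 (.node v2 i2 l2 r2)) l1
termination_by a b => a.size + b.size
decreasing_by all_goals simp [SkewHeap.size]

-- Source B `if pos[i] >= 0: h = _merge(h, ((values[i][pos[i]], i), None, None))`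
def pvPush (values : List (List Int)) (pos : List Int) (i : Nat) (h : SkewHeap) : SkewHeap :=
  let p := pos.getD i 0
  if 0 ≤ p then
    pvMerge h (.node ((PySem.List.pyGet? (values.getD i []) p).getD 0) i .leaf .leaf)
  else h

-- one iteration of Source B's main loop, state (pos, h, ans)
def pvStepB (values : List (List Int)) (st : List Int × SkewHeap × Int) (d : Int) :
    List Int × SkewHeap × Int :=
  let (pos, h, ans) := st
  match h with
  | .leaf => st  -- Python raises TypeError (h is None) here; excluded by Pre_
  | .node v i l r =>
    let h1 := pvMerge l r
    let ans1 := ans + d * v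
    let pos1 := pos.set i.toNat (pos.getD i.toNat 0 - 1)
    (pos1, pvPush values pos1 i.toNat h1, ans1)

def maxSpending_alt (values : List (List Int)) : Int :=
  let m := values.length
  let n := (values.getD 0 []).length  -- values[0]: IndexError on []; excluded by Pre_
  let pos0 := values.map (fun r => (r.length : Int) - 1)
  let h0 := (List.range m).foldl (fun h i => pvPush values pos0 i h) SkewHeap.leaf
  ((PySem.List.pyRange 1 (m * n + 1) 1).foldl (pvStepB values) (pos0, h0, 0)).2.2

-- ===== PRECONDITION & SPEC =====
-- Pre_ = exactly the inputs where Python A returns: A raises IndexError on `values[0]`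
-- for empty `values`, and ValueError (`min()` of an empty sequence) when the rows hold
-- fewer than len(values)*len(values[0]) elements in total, so that they run dry before
-- the loop's m*n pops are done.
def Pre_maxSpending (values : List (List Int)) : Prop :=
  values ≠ [] ∧ values.length * (values.getD 0 []).length ≤ (values.map List.length).sum

instance (values : List (List Int)) : Decidable (Pre_maxSpending values) := by
  unfold Pre_maxSpending; infer_instance

def pvWitness_maxSpending : List (List Int) := [[1, 2], [3, 4]]

def Spec_maxSpending (values : List (List Int)) (out : Int) : Prop := out = maxSpending_alt values
instance (values : List (List Int)) (out : Int) : Decidable (Spec_maxSpending values out) := by unfold Spec_maxSpending; infer_instance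

-- ===== CLAIM (what is proved, stated in full; the proofs are below) =====
def Claim_equal_maxSpending : Prop := ∀ (values : List (List Int)), Dom_maxSpending values → Pre_maxSpending values → Spec_maxSpending values (maxSpending values)

-- ===== LEMMAS AND PROOFS =====

def pvPle (a b : Int × Int) : Prop := a.1 < b.1 ∨ (a.1 = b.1 ∧ a.2 ≤ b.2)

theorem pvPairLt_true {a b : Int × Int} :
    pvPairLt a b = true ↔ (a.1 < b.1 ∨ (a.1 = b.1 ∧ a.2 < b.2)) := by
  simp [pvPairLt]

theorem pvPairLt_false {a b : Int × Int} : pvPairLt a b = false ↔ pvPle b a := by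
  simp [pvPairLt, pvPle]; omega

theorem pvPle_trans {a b c : Int × Int} (h1 : pvPle a b) (h2 : pvPle b c) : pvPle a c := by
  unfold pvPle at *; omega

theorem pvPairLt_le {a b : Int × Int} (h : pvPairLt a b = true) : pvPle a b := by
  rw [pvPairLt_true] at h; unfold pvPle; omega

theorem pvPle_refl (a : Int × Int) : pvPle a a := by unfold pvPle; omega

theorem pvPle_antisymm {a b : Int × Int} (h1 : pvPle a b) (h2 : pvPle b a) : a = b := by
  unfold pvPle at *
  exact Prod.ext (by omega) (by omega)

theorem pvFoldMin_spec (xs : List (Int × Int)) : ∀ x : Int × Int,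
    (xs.foldl (fun cur c => if pvPairLt c cur then c else cur) x) ∈ x :: xs ∧
    pvPle (xs.foldl (fun cur c => if pvPairLt c cur then c else cur) x) x ∧
    ∀ y ∈ xs, pvPle (xs.foldl (fun cur c => if pvPairLt c cur then c else cur) x) y := by
  induction xs with
  | nil => intro x; exact ⟨by simp, pvPle_refl x, by simp⟩
  | cons c cs ih =>
    intro x
    rw [List.foldl_cons]
    obtain ⟨hmem, hhd, hrest⟩ := ih (if pvPairLt c x then c else x)
    by_cases hc : pvPairLt c x = true
    · rw [if_pos hc] at hmem hhd hrest ⊢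
      refine ⟨?_, pvPle_trans hhd (pvPairLt_le hc), ?_⟩
      · rcases List.mem_cons.mp hmem with h | h
        · rw [h]; simp
        · simp [h]
      · intro y hy
        rcases List.mem_cons.mp hy with h | h
        · rw [h]; exact hhd
        · exact hrest y h
    · rw [if_neg hc] at hmem hhd hrest ⊢
      have hxc : pvPle x (c.1, c.2) := pvPairLt_false.mp (by simpa using hc)
      refine ⟨?_, hhd, ?_⟩
      · rcases List.mem_cons.mp hmem with h | h
        · rw [h]; simp
        · simp [h]
      · intro y hy
        rcases List.mem_cons.mp hy with h | h
        · rw [h]; exact pvPle_trans hhd hxc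
        · exact hrest y h

theorem pvMin?_spec {l : List (Int × Int)} {p : Int × Int} (h : pvMin? l = some p) :
    p ∈ l ∧ ∀ y ∈ l, pvPle p y := by
  match l with
  | [] => simp [pvMin?] at h
  | x :: xs =>
    simp only [pvMin?, Option.some.injEq] at h
    obtain ⟨hmem, hhd, hrest⟩ := pvFoldMin_spec xs x
    rw [h] at hmem hhd hrest
    refine ⟨hmem, ?_⟩
    intro y hy
    rcases List.mem_cons.mp hy with hh | hh
    · rw [hh]; exact hhd
    · exact hrest y hh

def SkewHeap.toL : SkewHeap → List (Int × Int)
  | .leaf => []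
  | .node v i l r => (v, i) :: (l.toL ++ r.toL)

def HOrd : SkewHeap → Prop
  | .leaf => True
  | .node v i l r => (∀ p ∈ l.toL ++ r.toL, pvPle (v, i) p) ∧ HOrd l ∧ HOrd r

theorem toL_eq_nil {h : SkewHeap} : h.toL = [] ↔ h = .leaf := by
  cases h <;> simp [SkewHeap.toL]

theorem pvMerge_toMS (a b : SkewHeap) :
    ((pvMerge a b).toL : Multiset (Int × Int)) = (a.toL : Multiset (Int × Int)) + (b.toL : Multiset (Int × Int)) := by
  induction a, b using pvMerge.induct with
  | case1 b => simp [pvMerge, SkewHeap.toL]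
  | case2 a h => cases a <;> simp_all [pvMerge, SkewHeap.toL]
  | case3 v1 i1 l1 r1 v2 i2 l2 r2 hlt ih =>
    rw [pvMerge, if_pos hlt]
    simp only [SkewHeap.toL]
    simp only [← Multiset.cons_coe, ← Multiset.coe_add, ← Multiset.singleton_add, ih,
      SkewHeap.toL]
    abel
  | case4 v1 i1 l1 r1 v2 i2 l2 r2 hlt ih =>
    rw [pvMerge, if_neg hlt]
    simp only [SkewHeap.toL]
    simp only [← Multiset.cons_coe, ← Multiset.coe_add, ← Multiset.singleton_add, ih,
      SkewHeap.toL]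
    abel

theorem hord_le {v i : Int} {l r : SkewHeap} (h : HOrd (.node v i l r)) :
    ∀ p ∈ (SkewHeap.node v i l r).toL, pvPle (v, i) p := by
  intro p hp
  rcases List.mem_cons.mp hp with hh | hh
  · rw [hh]; exact pvPle_refl _
  · exact h.1 p hh

theorem mem_toL_merge {p : Int × Int} {a b : SkewHeap} :
    p ∈ (pvMerge a b).toL ↔ p ∈ a.toL ∨ p ∈ b.toL := by
  have := pvMerge_toMS a b
  constructor
  · intro hp
    have : p ∈ ((pvMerge a b).toL : Multiset (Int × Int)) := by simpa using hp
    rw [pvMerge_toMS] at this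
    simpa using this
  · intro hp
    have : p ∈ ((a.toL : Multiset (Int × Int)) + (b.toL : Multiset (Int × Int))) := by
      simpa using hp
    rw [← pvMerge_toMS] at this
    simpa using this

theorem pvMerge_HOrd {a b : SkewHeap} (ha : HOrd a) (hb : HOrd b) : HOrd (pvMerge a b) := by
  induction a, b using pvMerge.induct with
  | case1 b => simpa [pvMerge]
  | case2 a h => cases a <;> simp_all [pvMerge]
  | case3 v1 i1 l1 r1 v2 i2 l2 r2 hlt ih =>
    rw [pvMerge, if_pos hlt]
    have hle : pvPle (v2, i2) (v1, i1) := pvPairLt_le hlt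
    refine ⟨?_, ih ha hb.2.2, hb.2.1⟩
    intro p hp
    rcases List.mem_append.mp hp with hh | hh
    · rcases mem_toL_merge.mp hh with h1 | h1
      · exact pvPle_trans hle (hord_le ha p h1)
      · exact hb.1 p (List.mem_append.mpr (Or.inr h1))
    · exact hb.1 p (List.mem_append.mpr (Or.inl hh))
  | case4 v1 i1 l1 r1 v2 i2 l2 r2 hlt ih =>
    rw [pvMerge, if_neg hlt]
    have hle : pvPle (v1, i1) (v2, i2) := pvPairLt_false.mp (by simpa using hlt)
    refine ⟨?_, ih ha.2.2 hb, ha.2.1⟩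
    intro p hp
    rcases List.mem_append.mp hp with hh | hh
    · rcases mem_toL_merge.mp hh with h1 | h1
      · exact ha.1 p (List.mem_append.mpr (Or.inr h1))
      · exact pvPle_trans hle (hord_le hb p h1)
    · exact ha.1 p (List.mem_append.mpr (Or.inl hh))

theorem mem_pvLastA {vals : List (List Int)} {m : Nat} {v ixI : Int} :
    (v, ixI) ∈ pvLastA vals m ↔
      ∃ j : Nat, j < m ∧ ixI = (j : Int) ∧ (vals.getD j []).getLast? = some v := by
  simp only [pvLastA, List.mem_filterMap, List.mem_range, Option.map_eq_some_iff]
  constructor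
  · rintro ⟨j, hj, w, hw, heq⟩
    obtain ⟨rfl, rfl⟩ := Prod.mk.injEq _ _ _ _ ▸ heq
    exact ⟨j, hj, rfl, hw⟩
  · rintro ⟨j, hj, rfl, hlast⟩
    exact ⟨j, hj, v, hlast, rfl⟩

theorem pvLastA_split {m ix : Nat} (vals : List (List Int)) (hix : ix < m) :
    pvLastA vals m =
      pvLastA vals ix
        ++ ((vals.getD ix []).getLast?.map (fun v => (v, (ix : Int)))).toList
        ++ ((List.range (m - (ix + 1))).map (fun k => ix + 1 + k)).filterMap
             (fun i => (vals.getD i []).getLast?.map (fun v => (v, (i : Int)))) := by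
  unfold pvLastA
  have hm : m = (ix + 1) + (m - (ix + 1)) := by omega
  rw [hm, List.range_add, List.filterMap_append, List.range_succ, List.filterMap_append]
  congr 1
  congr 1
  cases (vals.getD ix []).getLast? <;> simp

theorem getD_set_ne {α : Type} {l : List α} {j i : Nat} {a d : α} (h : i ≠ j) :
    (l.set j a).getD i d = l.getD i d := by
  simp [List.getD_eq_getElem?_getD, List.getElem?_set_ne (by omega : j ≠ i)]

theorem getD_set_self {α : Type} {l : List α} {j : Nat} {a d : α} (h : j < l.length) :
    (l.set j a).getD j d = a := by
  simp [List.getD_eq_getElem?_getD, List.getElem?_set_self, h]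

theorem getD_of_lt {α : Type} {l : List α} {j : Nat} {d : α} (h : j < l.length) :
    l.getD j d = l[j] := by
  simp [List.getD_eq_getElem?_getD, List.getElem?_eq_getElem h]

theorem pvLastA_congr {vals vals' : List (List Int)} {mm : Nat}
    (h : ∀ i < mm, vals'.getD i [] = vals.getD i []) :
    pvLastA vals' mm = pvLastA vals mm := by
  unfold pvLastA
  exact List.filterMap_congr (fun i hi => by rw [h i (List.mem_range.mp hi)])

def InvRows (values vals : List (List Int)) (pos : List Int) : Prop :=
  vals.length = values.length ∧ pos.length = values.length ∧
  ∀ i < values.length,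
    (vals.getD i []) <+: (values.getD i []) ∧
    pos.getD i 0 = ((vals.getD i []).length : Int) - 1

def InvHeap (vals : List (List Int)) (m : Nat) (h : SkewHeap) : Prop :=
  HOrd h ∧ (h.toL : Multiset (Int × Int)) = (pvLastA vals m : Multiset (Int × Int))

def pvInv (values vals : List (List Int)) (pos : List Int) (h : SkewHeap) : Prop :=
  InvRows values vals pos ∧ InvHeap vals values.length h

theorem hord_singleton (w : Int) (j : Int) : HOrd (.node w j .leaf .leaf) := by
  refine ⟨?_, trivial, trivial⟩
  intro p hp
  simp [SkewHeap.toL] at hp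

theorem step_sim {values vals : List (List Int)} {pos : List Int} {h : SkewHeap} {ans d : Int}
    (hInv : pvInv values vals pos h) (hne : pvLastA vals values.length ≠ []) :
    ∃ (v : Int) (vals' : List (List Int)) (pos' : List Int) (h' : SkewHeap),
      pvStepA values.length (vals, ans, d) = (vals', ans + d * v, d + 1) ∧
      pvStepB values (pos, h, ans) d = (pos', h', ans + d * v) ∧
      pvInv values vals' pos' h' := by
  obtain ⟨⟨hlen, hplen, hrow⟩, hord, hms⟩ := hInv
  set m := values.length with hm
  -- A's min exists
  obtain ⟨p, hpEq⟩ : ∃ p, pvMin? (pvLastA vals m) = some p := by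
    cases hL : pvLastA vals m with
    | nil => exact absurd hL hne
    | cons a t => exact ⟨_, rfl⟩
  obtain ⟨hpMem, hpMin⟩ := pvMin?_spec hpEq
  obtain ⟨v, ixI⟩ := p
  obtain ⟨j, hjm, hixI, hlastj⟩ := mem_pvLastA.mp hpMem
  subst hixI
  set row := vals.getD j [] with hrowdef
  have hrowne : row ≠ [] := by intro hc; rw [hc] at hlastj; simp at hlastj
  have hrl : 1 ≤ row.length := List.length_pos_of_ne_nil hrowne
  -- the heap is a node, and its root is A's min
  cases h with
  | leaf =>
    rw [show SkewHeap.toL .leaf = [] from rfl] at hms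
    have : pvLastA vals m = [] := by
      have := hms.symm
      rwa [show ((([] : List (Int × Int)) : Multiset (Int × Int)) = 0) from rfl,
        Multiset.coe_eq_zero] at this
    exact absurd this hne
  | node v' i' l r =>
    have hrootMem : (v', i') ∈ pvLastA vals m := by
      have : (v', i') ∈ ((SkewHeap.node v' i' l r).toL : Multiset (Int × Int)) := by
        simp [SkewHeap.toL]
      rw [hms] at this
      simpa using this
    have h1 : pvPle (v, (j : Int)) (v', i') := hpMin _ hrootMem
    have h2 : pvPle (v', i') (v, (j : Int)) := by
      apply hord_le hord
      have : (v, (j : Int)) ∈ ((SkewHeap.node v' i' l r).toL : Multiset (Int × Int)) := by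
        rw [hms]; simpa using hpMem
      simpa using this
    obtain ⟨hv, hi⟩ : v' = v ∧ i' = (j : Int) := by
      have := pvPle_antisymm h2 h1
      exact ⟨congrArg Prod.fst this, congrArg Prod.snd this⟩
    rw [hv, hi] at hms hord
    -- names for the new states
    set newrow := row.dropLast with hnrdef
    have hnrlen : newrow.length = row.length - 1 := by simp [hnrdef]
    set posj := pos.getD j 0 with hposj
    have hposjval : posj = (row.length : Int) - 1 := (hrow j hjm).2
    set pos' := pos.set j (posj - 1) with hpos'
    have hpos'j : pos'.getD j 0 = (newrow.length : Int) - 1 := by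
      rw [hpos', getD_set_self (by omega : j < pos.length)]
      rw [hposjval, hnrlen]
      push_cast [hrl]
      omega
    -- compute step A
    have hstepA : pvStepA m (vals, ans, d) =
        (vals.set j newrow, ans + d * v, d + 1) := by
      simp only [pvStepA, hpEq]
      rw [Int.toNat_natCast]
      rw [← hrowdef, ← hnrdef, hlastj]
      rfl
    -- compute step B
    have hstepB : pvStepB values (pos, .node v (j : Int) l r, ans) d =
        (pos', pvPush values pos' j (pvMerge l r), ans + d * v) := by
      simp only [pvStepB]
      rw [Int.toNat_natCast, ← hposj, ← hpos']
    refine ⟨v, vals.set j newrow, pos', pvPush values pos' j (pvMerge l r), hstepA, by rw [hv, hi]; exact hstepB, ?_⟩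
    have hjv : j < vals.length := by omega
    have hgetj : (vals.set j newrow).getD j [] = newrow := getD_set_self hjv
    have hpre' : newrow <+: values.getD j [] :=
      (List.dropLast_prefix row).trans (hrow j hjm).1
    constructor
    · -- InvRows
      refine ⟨by simpa using hlen, by rw [hpos']; simpa using hplen, ?_⟩
      intro i hi
      by_cases hij : i = j
      · subst hij
        refine ⟨by rw [hgetj]; exact hpre', ?_⟩
        rw [hgetj, hpos'j]
      · rw [getD_set_ne hij, getD_set_ne hij]
        exact hrow i hi
    · -- InvHeap
      have hordlr : HOrd (pvMerge l r) := pvMerge_HOrd hord.2.1 hord.2.2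
      -- split both `last` lists at j
      have hs1 := pvLastA_split vals hjm
      have hs2 := pvLastA_split (vals.set j newrow) hjm
      have hc1 : pvLastA (vals.set j newrow) j = pvLastA vals j :=
        pvLastA_congr (fun i hi => getD_set_ne (by omega))
      have hc3 : ((List.range (m - (j + 1))).map (fun k => j + 1 + k)).filterMap
            (fun i => ((vals.set j newrow).getD i []).getLast?.map (fun v => (v, (i : Int)))) =
          ((List.range (m - (j + 1))).map (fun k => j + 1 + k)).filterMap
            (fun i => (vals.getD i []).getLast?.map (fun v => (v, (i : Int)))) := by
        apply List.filterMap_congr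
        intro a ha
        obtain ⟨k, _, rfl⟩ := List.mem_map.mp ha
        rw [getD_set_ne (by omega)]
      set C1 := pvLastA vals j with hC1
      set C3 := ((List.range (m - (j + 1))).map (fun k => j + 1 + k)).filterMap
            (fun i => (vals.getD i []).getLast?.map (fun v => (v, (i : Int)))) with hC3
      have hEj : ((vals.getD j []).getLast?.map (fun v => (v, (j : Int)))).toList
          = [(v, (j : Int))] := by rw [← hrowdef, hlastj]; rfl
      have hmsplit : (pvLastA vals m : Multiset (Int × Int)) =
          (v, (j : Int)) ::ₘ ((C1 : Multiset (Int × Int)) + (C3 : Multiset (Int × Int))) := by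
        rw [hs1, hEj]
        simp only [← Multiset.cons_coe, ← Multiset.coe_add, ← Multiset.singleton_add]
        abel
      have hlr : (l.toL : Multiset (Int × Int)) + (r.toL : Multiset (Int × Int)) =
          (C1 : Multiset (Int × Int)) + (C3 : Multiset (Int × Int)) := by
        have h0 : ((SkewHeap.node v (j : Int) l r).toL : Multiset (Int × Int)) =
            (v, (j : Int)) ::ₘ ((l.toL : Multiset (Int × Int)) + (r.toL : Multiset (Int × Int))) := by
          simp only [SkewHeap.toL, ← Multiset.cons_coe, ← Multiset.coe_add]
        rw [h0, hmsplit] at hms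
        exact Multiset.cons_inj_right _ |>.mp hms
      have hms2 : (pvLastA (vals.set j newrow) m : Multiset (Int × Int)) =
          (C1 : Multiset (Int × Int)) + (C3 : Multiset (Int × Int)) +
            ((newrow.getLast?.map (fun w => (w, (j : Int)))).toList : Multiset (Int × Int)) := by
        rw [hs2, hc1, hc3, hgetj]
        simp only [← Multiset.cons_coe, ← Multiset.coe_add]
        abel
      by_cases hE : newrow = []
      · -- row exhausted: nothing is pushed back
        have hcond : ¬ (0 ≤ pos'.getD j 0) := by rw [hpos'j, hE]; simp
        have hpush : pvPush values pos' j (pvMerge l r) = pvMerge l r := by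
          rw [pvPush]; simp only [hcond, if_false]
        rw [hpush]
        refine ⟨hordlr, ?_⟩
        rw [pvMerge_toMS, hms2, hE, hlr]
        simp
      · -- push the row's new last element
        obtain ⟨w, hw⟩ : ∃ w, newrow.getLast? = some w := by
          cases hNE : newrow.getLast? with
          | none => exact absurd (List.getLast?_eq_none_iff.mp hNE) hE
          | some w => exact ⟨w, rfl⟩
        have hnl : 1 ≤ newrow.length := List.length_pos_of_ne_nil hE
        have hlenle : newrow.length ≤ (values.getD j []).length := hpre'.length_le
        have hcond : (0 ≤ pos'.getD j 0) := by rw [hpos'j]; push_cast; omega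
        have hval : (PySem.List.pyGet? (values.getD j []) (pos'.getD j 0)).getD 0 = w := by
          rw [hpos'j, PySem.List.pyGet?_of_nonneg (values.getD j [])
            (show (0:Int) ≤ (newrow.length : Int) - 1 by push_cast; omega)]
          have htn : ((newrow.length : Int) - 1).toNat = newrow.length - 1 := by omega
          rw [htn]
          have hidx : newrow.length - 1 < (values.getD j []).length := by omega
          rw [List.getElem?_eq_getElem hidx, Option.getD_some]
          have h2 : newrow[newrow.length - 1]'(by omega) = w := by
            have := List.getLast?_eq_getElem? (l := newrow)
            rw [hw, List.getElem?_eq_getElem (by omega : newrow.length - 1 < newrow.length)] at this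
            exact (Option.some.injEq _ _ ▸ this).symm
          exact (hpre'.getElem (by omega)).symm.trans h2
        have hpush : pvPush values pos' j (pvMerge l r) =
            pvMerge (pvMerge l r) (.node w (j : Int) .leaf .leaf) := by
          rw [pvPush]
          simp only [hcond, if_true, hval]
        rw [hpush]
        refine ⟨pvMerge_HOrd hordlr (hord_singleton w (j : Int)), ?_⟩
        rw [pvMerge_toMS, pvMerge_toMS, hms2, hw, hlr]
        simp only [SkewHeap.toL, Option.map_some, Option.toList]
        simp only [← Multiset.cons_coe, ← Multiset.coe_add, ← Multiset.singleton_add]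
        abel

theorem foldl_const {σ α : Type} (f : σ → σ) (l : List α) (s : σ) :
    l.foldl (fun st _ => f st) s = f^[l.length] s := by
  induction l generalizing s with
  | nil => rfl
  | cons a t ih => simp [List.foldl_cons, ih, Function.iterate_succ_apply]

theorem foldl_stepB_leaf (values : List (List Int)) (pos : List Int) (ans : Int)
    (ds : List Int) : ds.foldl (pvStepB values) (pos, .leaf, ans) = (pos, .leaf, ans) := by
  induction ds with
  | nil => rfl
  | cons d t ih => simpa [List.foldl_cons, pvStepB] using ih

theorem sim (k : Nat) : ∀ (values vals : List (List Int)) (pos : List Int) (h : SkewHeap)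
    (ans d : Int), pvInv values vals pos h →
    ((pvStepA values.length)^[k] (vals, ans, d)).2.1 =
      ((PySem.List.pyRange d (d + k) 1).foldl (pvStepB values) (pos, h, ans)).2.2 := by
  induction k with
  | zero =>
    intro values vals pos h ans d _
    rw [PySem.List.pyRange_one_eq_nil (by simp)]
    rfl
  | succ k ih =>
    intro values vals pos h ans d hInv
    by_cases hE : pvLastA vals values.length = []
    · -- all rows empty: A's step is the identity, B's heap is empty
      have hleaf : h = .leaf := by
        have hms := hInv.2.2
        have h0 : (h.toL : Multiset (Int × Int)) = 0 := by rw [hms, hE]; rfl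
        exact toL_eq_nil.mp (by rwa [Multiset.coe_eq_zero] at h0)
      subst hleaf
      rw [foldl_stepB_leaf]
      have hfix : pvStepA values.length (vals, ans, d) = (vals, ans, d) := by
        simp only [pvStepA, hE, pvMin?]
      rw [Function.iterate_fixed hfix]
    · obtain ⟨v, vals', pos', h', hA, hB, hInv'⟩ := step_sim (ans := ans) (d := d) hInv hE
      rw [Function.iterate_succ_apply, hA]
      rw [PySem.List.pyRange_one_cons (by push_cast; omega), List.foldl_cons, hB]
      have harg : d + ((k + 1 : Nat) : Int) = (d + 1) + (k : Int) := by push_cast; ring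
      rw [harg]
      exact ih values vals' pos' h' (ans + d * v) (d + 1) hInv'

theorem init_heap (values : List (List Int)) : ∀ mm, mm ≤ values.length →
    HOrd ((List.range mm).foldl
        (fun h i => pvPush values (values.map (fun r => (r.length : Int) - 1)) i h)
        SkewHeap.leaf) ∧
    ((((List.range mm).foldl
        (fun h i => pvPush values (values.map (fun r => (r.length : Int) - 1)) i h)
        SkewHeap.leaf).toL : Multiset (Int × Int)) = (pvLastA values mm : Multiset (Int × Int))) := by
  intro mm
  induction mm with
  | zero => intro _; exact ⟨trivial, rfl⟩
  | succ mm ih =>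
    intro hle
    obtain ⟨ho, hms⟩ := ih (by omega)
    have hmm : mm < values.length := by omega
    set pos0 := values.map (fun r => (r.length : Int) - 1) with hpos0
    set hprev := (List.range mm).foldl (fun h i => pvPush values pos0 i h) SkewHeap.leaf
      with hprevdef
    have hfold : (List.range (mm + 1)).foldl (fun h i => pvPush values pos0 i h) SkewHeap.leaf
        = pvPush values pos0 mm hprev := by
      rw [List.range_succ, List.foldl_append]
      rfl
    have hsplit : pvLastA values (mm + 1)
        = pvLastA values mm ++ ((values.getD mm []).getLast?.map (fun v => (v, (mm : Int)))).toList := by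
      unfold pvLastA
      rw [List.range_succ, List.filterMap_append]
      rw [List.getD_eq_getElem?_getD]
      cases hL : (values[mm]?.getD []).getLast? <;> simp [hL]
    have hposmm : pos0.getD mm 0 = ((values.getD mm []).length : Int) - 1 := by
      rw [hpos0, getD_of_lt (by simpa using hmm), List.getElem_map,
        getD_of_lt hmm]
    rw [hfold, hsplit]
    by_cases hEmp : values.getD mm [] = []
    · have hcond : ¬ (0 ≤ pos0.getD mm 0) := by rw [hposmm, hEmp]; simp
      have hpush : pvPush values pos0 mm hprev = hprev := by
        rw [pvPush]; simp only [hcond, if_false]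
      rw [hpush, hEmp]
      exact ⟨ho, by simpa using hms⟩
    · obtain ⟨w, hw⟩ : ∃ w, (values.getD mm []).getLast? = some w := by
        cases hNE : (values.getD mm []).getLast? with
        | none => exact absurd (List.getLast?_eq_none_iff.mp hNE) hEmp
        | some w => exact ⟨w, rfl⟩
      have hlp : 1 ≤ (values.getD mm []).length := List.length_pos_of_ne_nil hEmp
      have hcond : (0 ≤ pos0.getD mm 0) := by rw [hposmm]; push_cast; omega
      have hval : (PySem.List.pyGet? (values.getD mm []) (pos0.getD mm 0)).getD 0 = w := by
        rw [hposmm, PySem.List.pyGet?_of_nonneg (values.getD mm [])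
          (show (0:Int) ≤ ((values.getD mm []).length : Int) - 1 by push_cast; omega)]
        have htn : (((values.getD mm []).length : Int) - 1).toNat
            = (values.getD mm []).length - 1 := by omega
        rw [htn, List.getElem?_eq_getElem (by omega), Option.getD_some]
        have := List.getLast?_eq_getElem? (l := values.getD mm [])
        rw [hw, List.getElem?_eq_getElem (by omega)] at this
        exact (Option.some.injEq _ _ ▸ this).symm
      have hpush : pvPush values pos0 mm hprev
          = pvMerge hprev (.node w (mm : Int) .leaf .leaf) := by
        rw [pvPush]
        simp only [hcond, if_true, hval]
      rw [hpush, hw]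
      refine ⟨pvMerge_HOrd ho (hord_singleton w (mm : Int)), ?_⟩
      rw [pvMerge_toMS, hms]
      simp only [SkewHeap.toL, Option.map_some, Option.toList]
      simp only [← Multiset.cons_coe, ← Multiset.coe_add, ← Multiset.singleton_add]
      abel

theorem inv_init (values : List (List Int)) :
    pvInv values values (values.map (fun r => (r.length : Int) - 1))
      ((List.range values.length).foldl
        (fun h i => pvPush values (values.map (fun r => (r.length : Int) - 1)) i h)
        SkewHeap.leaf) := by
  obtain ⟨ho, hms⟩ := init_heap values values.length (le_refl _)
  refine ⟨⟨rfl, by simp, ?_⟩, ho, hms⟩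
  intro i hi
  refine ⟨List.prefix_refl _, ?_⟩
  rw [getD_of_lt (by simpa using hi), List.getElem_map, getD_of_lt hi]

theorem ports_eq (values : List (List Int)) : maxSpending values = maxSpending_alt values := by
  simp only [maxSpending, maxSpending_alt]
  rw [foldl_const, List.length_range]
  have := sim (values.length * (values.getD 0 []).length) values values
    (values.map (fun r => (r.length : Int) - 1))
    ((List.range values.length).foldl
      (fun h i => pvPush values (values.map (fun r => (r.length : Int) - 1)) i h)
      SkewHeap.leaf) 0 1 (inv_init values)
  have harg : (1 : Int) + (↑(values.length * (values.getD 0 []).length) : Int)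
      = (↑(values.length * (values.getD 0 []).length) : Int) + 1 := by ring
  rw [harg] at this
  exact this

-- ===== VERDICT (by name: the statement is the Claim_ definition above) =====
theorem maxSpending_spec : Claim_equal_maxSpending := by
  intro values _ _
  unfold Spec_maxSpending
  exact ports_eq values
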